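-- pv_equiv track=rewrite | github.com/yash-wins/Placement-Prep | Intermediate DSA/Sliding Window/multiple_left_rotations_of_array.py | solve
-- ===== SOURCE A (Python) =====
-- def solve(A, B):
--     n = len(A)
--     a2 = []
--     for i in range(len(B)):
--         B[i] = B[i]%n
--         a1 = [0 for i in range(n)]
--         a1[:] = A[B[i]:n] + A[0:B[i]]
--         a2.append(a1)
--     return a2
-- ===== SOURCE B (Python) =====
-- def solve(A, B):
--     n = len(A)
--     cache = {}
--     out = []
--     for i in range(len(B)):
--         r = B[i] % n
--         B[i] = r
--         if r not in cache:
--             cache[r] = [A[(r + j) % n] for j in range(n)]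
--         out.append(cache[r])
--     return out
-- ===== Notes on version B (the rewrite author's own statement) =====
-- stated objective: alternative
-- what changed: B never slices or concatenates: each rotation is built element-wise by modular indexing A[(r+j)%n], and a dict keyed by the reduced rotation count r memoizes rotations so duplicate counts in B are computed once; the in-place reduction B[i] = B[i]%n is preserved.
import Mathlib
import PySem

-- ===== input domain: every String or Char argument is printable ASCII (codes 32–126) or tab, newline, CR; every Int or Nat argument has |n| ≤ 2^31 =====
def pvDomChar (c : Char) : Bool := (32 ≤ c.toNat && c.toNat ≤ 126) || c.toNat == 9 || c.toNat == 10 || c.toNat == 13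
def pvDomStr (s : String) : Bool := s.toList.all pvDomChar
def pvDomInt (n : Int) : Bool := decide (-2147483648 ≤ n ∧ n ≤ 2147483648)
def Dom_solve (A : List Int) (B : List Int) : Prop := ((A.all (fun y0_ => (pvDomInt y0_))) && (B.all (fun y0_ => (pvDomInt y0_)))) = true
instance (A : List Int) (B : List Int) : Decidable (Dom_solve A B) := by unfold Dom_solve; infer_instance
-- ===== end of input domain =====

-- B builds each rotation element-wise by modular indexing and memoizes rotations per residue in a dict,
-- instead of A's per-query slice-and-concatenate (alternative decomposition). Both A and B mutate B in
-- place identically (B[i] := B[i] % n); the equivalence proved here is about the return value.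

-- ===== PORT A =====
-- each iteration reads the fresh B[i], reduces it mod n, and appends A[r:n] + A[0:r]
-- (the '[0]*n' list a1 is wholly overwritten by the slice assignment, so the appended value is the concatenation)
def solve (A : List Int) (B : List Int) : List (List Int) :=
  let n : Int := A.length
  B.foldl (fun a2 b =>
    let r := PySem.Int.mod b n
    let a1 := PySem.List.slice A (some r) (some n) ++ PySem.List.slice A (some 0) (some r)
    a2 ++ [a1]) []

-- ===== PORT B =====
-- state = (cache, out); cache[r] (once filled) is [A[(r+j)%n] for j in range(n)];
-- 'out.append(cache[r])' after the fill is the total lookup 'getD cache r []' (the key is always present)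
def solve_alt (A : List Int) (B : List Int) : List (List Int) :=
  let n : Int := A.length
  (B.foldl (fun (s : PySem.Dict Int (List Int) × List (List Int)) b =>
      let r := PySem.Int.mod b n
      let cache :=
        match PySem.Dict.get? s.1 r with
        | some _ => s.1
        | none => PySem.Dict.insert s.1 r
            ((PySem.List.pyRange 0 n).map (fun j => PySem.List.pyGetD A (PySem.Int.mod (r + j) n) 0))
      (cache, s.2 ++ [PySem.Dict.getD cache r []])) (PySem.Dict.empty, [])).2

-- ===== PRECONDITION & SPEC =====
-- Pre_ excludes exactly the inputs where Python A raises ZeroDivisionError: A empty with B nonempty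
def Pre_solve (A : List Int) (B : List Int) : Prop := A ≠ [] ∨ B = []
instance (A : List Int) (B : List Int) : Decidable (Pre_solve A B) := by unfold Pre_solve; infer_instance
def pvWitness_solve : List Int × List Int := ([1, 2, 3], [0, 1, 4])
def Spec_solve (A : List Int) (B : List Int) (out : List (List Int)) : Prop := out = solve_alt A B
instance (A : List Int) (B : List Int) (out : List (List Int)) : Decidable (Spec_solve A B out) := by unfold Spec_solve; infer_instance

-- ===== CLAIM (what is proved, stated in full; the proofs are below) =====
def Claim_equal_solve : Prop := ∀ (A : List Int) (B : List Int), Dom_solve A B → Pre_solve A B → Spec_solve A B (solve A B)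

-- ===== LEMMAS AND PROOFS =====

-- the rotation B memoizes for residue r
def pvRot (A : List Int) (r : Int) : List Int :=
  (PySem.List.pyRange 0 (A.length : Int)).map
    (fun j => PySem.List.pyGetD A (PySem.Int.mod (r + j) (A.length : Int)) 0)

-- element-wise modular indexing produces the rotation drop/take form, for 0 ≤ r < |A|
theorem pvRot_eq_drop_take (A : List Int) (r : Int) (h0 : 0 ≤ r) (hlt : r < (A.length : Int)) :
    pvRot A r = A.drop r.toNat ++ A.take r.toNat := by
  have hn : 0 < A.length := by omega
  have hk : r.toNat < A.length := by omega
  unfold pvRot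
  rw [PySem.List.pyRange_zero_natCast, List.map_map]
  apply List.ext_getElem
  · simp; omega
  · intro i hi hi'
    have hiN : i < A.length := by simpa using hi
    have hidx : PySem.Int.mod (r + (i : Int)) (A.length : Int)
        = (((r.toNat + i) % A.length : Nat) : Int) := by
      rw [PySem.Int.mod_eq_emod_of_pos (by exact_mod_cast hn)]
      push_cast [Int.toNat_of_nonneg h0]
      omega
    have hm : (r.toNat + i) % A.length < A.length := Nat.mod_lt _ hn
    have htn : (((r.toNat + i) % A.length : Nat) : Int).toNat = (r.toNat + i) % A.length := by omega
    simp only [List.getElem_map, Function.comp_apply, List.getElem_range]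
    rw [hidx, PySem.List.pyGetD_of_nonneg A 0 (Int.natCast_nonneg _), htn,
        List.getD_eq_getElem _ _ hm, List.getElem_append]
    by_cases hcase : i < A.length - r.toNat
    · have hmod : (r.toNat + i) % A.length = r.toNat + i := Nat.mod_eq_of_lt (by omega)
      rw [dif_pos (by simpa using hcase)]
      simp [hmod]
    · have hmod : (r.toNat + i) % A.length = r.toNat + i - A.length := by
        have h1 : r.toNat + i - A.length < A.length := by omega
        have h2 : r.toNat + i = (r.toNat + i - A.length) + A.length := by omega
        rw [h2, Nat.add_mod_right, Nat.mod_eq_of_lt h1]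
        omega
      rw [dif_neg (by simpa using hcase)]
      simp only [List.getElem_take, List.length_drop]
      congr 1
      omega

-- A's two slices equal the same drop/take form
theorem pvSlices_eq_drop_take (A : List Int) (r : Int) (h0 : 0 ≤ r) (hlt : r < (A.length : Int)) :
    PySem.List.slice A (some r) (some (A.length : Int)) ++ PySem.List.slice A (some 0) (some r)
      = A.drop r.toNat ++ A.take r.toNat := by
  rw [PySem.List.slice_of_nonneg A h0 (by positivity) (le_of_lt hlt) (le_refl _),
      PySem.List.slice_of_nonneg A (le_refl (0 : Int)) h0 (by positivity) (le_of_lt hlt)]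
  congr 1
  apply List.take_of_length_le
  simp

-- the memoizing fold: if every cached value is the rotation of its key, the output column is a map
theorem pvLoop_inv (A : List Int) (n : Int) (hn : n = (A.length : Int)) :
    ∀ (B : List Int) (d : PySem.Dict Int (List Int)) (acc : List (List Int)),
      (∀ k v, PySem.Dict.get? d k = some v → v = pvRot A k) →
      (B.foldl (fun (s : PySem.Dict Int (List Int) × List (List Int)) b =>
          let r := PySem.Int.mod b n
          let cache :=
            match PySem.Dict.get? s.1 r with
            | some _ => s.1
            | none => PySem.Dict.insert s.1 r
                ((PySem.List.pyRange 0 n).map (fun j => PySem.List.pyGetD A (PySem.Int.mod (r + j) n) 0))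
          (cache, s.2 ++ [PySem.Dict.getD cache r []])) (d, acc)).2
        = acc ++ B.map (fun b => pvRot A (PySem.Int.mod b n)) := by
  intro B
  induction B with
  | nil => intro d acc _; simp
  | cons b bs ih =>
    intro d acc hinv
    simp only [List.foldl_cons, List.map_cons]
    set r := PySem.Int.mod b n with hr
    cases hget : PySem.Dict.get? d r with
    | some v =>
      have hv : v = pvRot A r := hinv r v hget
      have hgetD : PySem.Dict.getD d r [] = pvRot A r := by
        simp [PySem.Dict.getD, hget, hv]
      rw [ih d _ hinv, hgetD, hn]
      simp
    | none =>
      have hrot : ((PySem.List.pyRange 0 n).map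
          (fun j => PySem.List.pyGetD A (PySem.Int.mod (r + j) n) 0)) = pvRot A r := by
        rw [hn]; rfl
      rw [ih _ _ ?_]
      · rw [hrot]
        have : PySem.Dict.getD (PySem.Dict.insert d r (pvRot A r)) r [] = pvRot A r := by
          simp [PySem.Dict.getD, PySem.Dict.get?_insert_self]
        rw [this, hn]
        simp
      · intro k v hkv
        rw [hrot] at hkv
        by_cases hk : k = r
        · subst hk
          rw [PySem.Dict.get?_insert_self] at hkv
          exact (Option.some_inj.mp hkv).symm ▸ rfl
        · rw [PySem.Dict.get?_insert_of_ne d _ hk] at hkv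
          exact hinv k v hkv

-- ===== VERDICT (by name: the statement is the Claim_ definition above) =====
theorem solve_spec : Claim_equal_solve := by
  intro A B _ hpre
  unfold Spec_solve solve solve_alt
  rcases hpre with hA | hB
  · have hn : (0 : Int) < (A.length : Int) := by
      have := List.length_pos_iff.mpr hA
      exact_mod_cast this
    simp only []
    rw [PySem.List.foldl_append_singleton_eq_map
      (f := fun b => PySem.List.slice A (some (PySem.Int.mod b (A.length : Int))) (some (A.length : Int)) ++
        PySem.List.slice A (some 0) (some (PySem.Int.mod b (A.length : Int)))),
      pvLoop_inv A (A.length : Int) rfl B PySem.Dict.empty []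
        (by intro k v hkv; simp [PySem.Dict.get?, PySem.Dict.empty] at hkv)]
    simp only [List.nil_append]
    apply List.map_congr_left
    intro b _
    rw [pvSlices_eq_drop_take A _ (PySem.Int.mod_nonneg b hn) (PySem.Int.mod_lt b hn),
        pvRot_eq_drop_take A _ (PySem.Int.mod_nonneg b hn) (PySem.Int.mod_lt b hn)]
  · subst hB; rfl
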